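-- pv_equiv track=rewrite | github.com/Danit251/AI-project | word_specific_features.py | occurance_of_words
-- ===== SOURCE A (Python) =====
-- import string
--
-- def occurance_of_words(text):
--     words_set = set()
--     twice_occur_set = set()
--     third_occur_set = set()
--     words = text.split(" ")
--     for word in words:
--         if word in set(string.punctuation):
--             continue
--         for sign in set(string.punctuation):
--             word = word.replace(sign+" ", "")
--
--         if word in twice_occur_set:
--             third_occur_set.add(word)
--         elif word in words_set:
--             twice_occur_set.add(word)
--         else:
--             words_set.add(word)
--
--
--     unique_words = words_set - twice_occur_set
--     twice_time = twice_occur_set - third_occur_set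
--
--     return [len(words_set), len(unique_words), len(twice_time)]
-- ===== SOURCE B (Python) =====
-- import string
--
--
-- def occurance_of_words(text):
--     punct = set(string.punctuation)
--     counts = {}
--     for w in text.split(" "):
--         if w not in punct:
--             counts[w] = counts.get(w, 0) + 1
--     once = sum(1 for c in counts.values() if c == 1)
--     twice = sum(1 for c in counts.values() if c == 2)
--     return [len(counts), once, twice]
-- ===== Notes on version B (the rewrite author's own statement) =====
-- stated objective: simpler
-- what changed: B keeps one frequency dict per word and classifies the counts (==1, ==2) afterwards, instead of A's three cascading occurrence sets updated per token, A's dead per-punctuation replace loop (a no-op since the space-split words contain no space), and the two final set differences.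
import Mathlib
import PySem

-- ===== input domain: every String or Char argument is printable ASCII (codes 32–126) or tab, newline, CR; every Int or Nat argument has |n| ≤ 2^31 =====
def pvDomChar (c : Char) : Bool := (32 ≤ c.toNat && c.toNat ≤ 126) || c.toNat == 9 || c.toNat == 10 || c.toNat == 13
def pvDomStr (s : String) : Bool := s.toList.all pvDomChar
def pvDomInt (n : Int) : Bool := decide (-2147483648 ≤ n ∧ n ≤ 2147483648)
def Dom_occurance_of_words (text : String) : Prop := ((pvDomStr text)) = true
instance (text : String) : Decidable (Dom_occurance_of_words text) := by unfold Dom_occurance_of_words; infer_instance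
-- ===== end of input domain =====

-- B replaces A's three cascading occurrence sets (and A's per-sign replace loop, a no-op on the space-split
-- words, and the two final set differences) by one frequency dict classified afterwards; objective: simpler.

-- ===== PORT A =====
-- string.punctuation
def pvPunct : List Char := "!\"#$%&'()*+,-./:;<=>?@[\\]^_`{|}~".toList
-- set(string.punctuation) used as a set of one-character words (membership only, order-independent)
def pvPunctWords : List (List Char) := pvPunct.map (fun c => [c])

-- A's loop body: skip punctuation tokens, run the per-sign replace loop, then the three-set cascade.
-- (A iterates the replace loop over set(string.punctuation) in hash order; the result is order-independent
-- — each replace leaves a word containing no space unchanged — so it is ported in string.punctuation order.)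
def pvStepA (st : PySem.Set (List Char) × PySem.Set (List Char) × PySem.Set (List Char))
    (word0 : List Char) :
    PySem.Set (List Char) × PySem.Set (List Char) × PySem.Set (List Char) :=
  if pvPunctWords.contains word0 then st
  else
    let word := pvPunct.foldl (fun w sign => PySem.Chars.replace w [sign, ' '] []) word0
    match st with
    | (ws, tw, th) =>
      if PySem.Set.contains tw word then (ws, tw, PySem.Set.add th word)
      else if PySem.Set.contains ws word then (ws, PySem.Set.add tw word, th)
      else (PySem.Set.add ws word, tw, th)

def occurance_of_words (text : String) : List Int :=
  match (PySem.Chars.splitOn text.toList [' ']).foldl pvStepA (([], [], [])) with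
  | (ws, tw, th) =>
    [PySem.Set.len ws,
     PySem.Set.len (PySem.Set.diff ws tw),
     PySem.Set.len (PySem.Set.diff tw th)]

-- ===== PORT B =====
def occurance_of_words_alt (text : String) : List Int :=
  let counts := (PySem.Chars.splitOn text.toList [' ']).foldl
    (fun d w => if pvPunctWords.contains w then d else d.insert w (d.getD w 0 + 1))
    (PySem.Dict.empty : PySem.Dict (List Char) Int)
  [(PySem.Dict.size counts : Int),
   ((PySem.Dict.values counts).countP (fun c => c == 1) : Int),
   ((PySem.Dict.values counts).countP (fun c => c == 2) : Int)]

-- ===== PRECONDITION & SPEC =====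
def Spec_occurance_of_words (text : String) (out : List Int) : Prop := out = occurance_of_words_alt text
instance (text : String) (out : List Int) : Decidable (Spec_occurance_of_words text out) := by unfold Spec_occurance_of_words; infer_instance

-- ===== CLAIM (what is proved, stated in full; the proofs are below) =====
def Claim_equal_occurance_of_words : Prop := ∀ (text : String), Dom_occurance_of_words text → Spec_occurance_of_words text (occurance_of_words text)

-- ===== LEMMAS AND PROOFS =====

-- words produced by splitting on a single space contain no space
lemma pv_splitOn_go_space : ∀ (fuel : Nat) (l cur : List Char) (acc : List (List Char)),
    l.length < fuel → (∀ u ∈ acc, ' ' ∉ u) → ' ' ∉ cur →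
    ∀ w ∈ PySem.Chars.splitOn.go [' '] fuel l cur acc, ' ' ∉ w := by
  intro fuel
  induction fuel with
  | zero => intro l cur acc h; omega
  | succ n ih =>
    intro l cur acc hlen hacc hcur w hw
    rw [PySem.Chars.splitOn.go.eq_def] at hw
    match l, hw with
    | [], hw =>
      simp only [List.mem_reverse, List.mem_cons] at hw
      rcases hw with h1 | h2
      · subst h1; simpa using fun hm => hcur (by simpa using hm)
      · exact hacc w h2
    | a :: t, hw =>
      by_cases hpre : [' '].isPrefixOf (a :: t) = true
      · simp only [hpre, if_true] at hw
        refine ih t [] (cur.reverse :: acc) (by simp at hlen ⊢; omega) ?_ (by simp) w hw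
        intro u hu
        rcases List.mem_cons.mp hu with h1 | h2
        · subst h1; simpa using fun hm => hcur (by simpa using hm)
        · exact hacc u h2
      · simp only [hpre] at hw
        have ha : a ≠ ' ' := by
          intro he; apply hpre
          subst he; simp [List.isPrefixOf]
        refine ih t (a :: cur) acc (by simp at hlen ⊢; omega) hacc ?_ w hw
        intro hm
        rcases List.mem_cons.mp hm with h1 | h2
        · exact ha h1.symm
        · exact hcur h2

lemma pv_mem_splitOn_space (s w : List Char) (h : w ∈ PySem.Chars.splitOn s [' ']) : ' ' ∉ w := by
  rw [PySem.Chars.splitOn] at h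
  exact pv_splitOn_go_space (s.length + 1) s [] [] (by omega) (by simp) (by simp) w h

-- replacing a pattern that contains a space is the identity on a word with no space
lemma pv_replace_go_id (c : Char) (new : List Char) :
    ∀ (fuel : Nat) (l acc : List Char), ' ' ∉ l →
      PySem.Chars.replace.go [c, ' '] new fuel l acc = acc.reverse ++ l := by
  intro fuel
  induction fuel with
  | zero => intro l acc _; rw [PySem.Chars.replace.go.eq_def]
  | succ n ih =>
    intro l acc h
    rw [PySem.Chars.replace.go.eq_def]
    match l with
    | [] => simp
    | a :: t =>
      have hpre : [c, ' '].isPrefixOf (a :: t) = false := by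
        by_contra hc
        have : [c, ' '] <+: a :: t := List.isPrefixOf_iff_prefix.mp (by
          cases hb : [c, ' '].isPrefixOf (a :: t) with
          | true => rfl
          | false => exact absurd hb hc)
        obtain ⟨r, hr⟩ := this
        have : ' ' ∈ a :: t := by rw [← hr]; simp
        exact h this
      simp only [hpre, Bool.false_eq_true, if_false]
      have ht : ' ' ∉ t := fun hm => h (List.mem_cons_of_mem _ hm)
      rw [ih t (a :: acc) ht]
      simp

lemma pv_replace_id (c : Char) (w : List Char) (h : ' ' ∉ w) :
    PySem.Chars.replace w [c, ' '] [] = w := by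
  rw [PySem.Chars.replace]
  simp only [List.isEmpty_cons, Bool.false_eq_true, if_false]
  rw [pv_replace_go_id c [] w.length w [] h]
  rfl

lemma pv_replace_fold_id (ps : List Char) (w : List Char) (h : ' ' ∉ w) :
    ps.foldl (fun w sign => PySem.Chars.replace w [sign, ' '] []) w = w := by
  induction ps with
  | nil => rfl
  | cons p t ih => simpa [pv_replace_id p w h] using ih

-- 'if p x: continue' inside a fold, as a fold over the filtered list
lemma pv_foldl_skip {α β : Type} (p : α → Bool) (f : β → α → β) :
    ∀ (l : List α) (st : β),
      l.foldl (fun st x => if p x then st else f st x) st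
        = (l.filter (fun x => !p x)).foldl f st := by
  intro l
  induction l with
  | nil => intro st; rfl
  | cons x t ih => intro st; by_cases h : p x <;> simp [h, ih]

-- the pure three-set cascade of A, on an already-filtered word
def pvStep (st : PySem.Set (List Char) × PySem.Set (List Char) × PySem.Set (List Char))
    (word : List Char) :
    PySem.Set (List Char) × PySem.Set (List Char) × PySem.Set (List Char) :=
  match st with
  | (ws, tw, th) =>
    if PySem.Set.contains tw word then (ws, tw, PySem.Set.add th word)
    else if PySem.Set.contains ws word then (ws, PySem.Set.add tw word, th)
    else (PySem.Set.add ws word, tw, th)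

-- loop invariant: the three sets are (seen at least once, at least twice, at least thrice)
lemma pvInv (l : List (List Char)) :
    ∃ S T U : PySem.Set (List Char),
      l.foldl pvStep (([], [], [])) = (S, T, U) ∧
      S.Nodup ∧ T.Nodup ∧
      (∀ w, w ∈ S ↔ w ∈ l) ∧
      (∀ w, w ∈ T ↔ 2 ≤ l.count w) ∧
      (∀ w, w ∈ U ↔ 3 ≤ l.count w) := by
  induction l using List.reverseRecOn with
  | nil => exact ⟨[], [], [], rfl, by simp, by simp, by simp, by simp, by simp⟩
  | append_singleton l x ih =>
    obtain ⟨S, T, U, heq, hSn, hTn, hS, hT, hU⟩ := ih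
    rw [List.foldl_append, heq]
    simp only [List.foldl_cons, List.foldl_nil]
    have hcount : ∀ w : List Char, (l ++ [x]).count w = l.count w + (if w = x then 1 else 0) := by
      intro w; rcases eq_or_ne w x with h | h
      · subst h; simp
      · simp [List.count_append, h, Ne.symm h]
    have hmemS : ∀ w, w ∈ S ↔ 1 ≤ l.count w := by
      intro w; rw [hS w]; exact ⟨fun h => List.count_pos_iff.mpr h, fun h => List.count_pos_iff.mp h⟩
    by_cases hxT : x ∈ T
    · have h2 : 2 ≤ l.count x := (hT x).mp hxT
      refine ⟨S, T, PySem.Set.add U x, by simp [pvStep, hxT], hSn, hTn, ?_, ?_, ?_⟩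
      · intro w; rw [hS w]; constructor
        · intro h; exact List.mem_append_left _ h
        · intro h; rcases List.mem_append.mp h with h | h
          · exact h
          · simp at h; subst h; exact List.count_pos_iff.mp (by omega)
      · intro w; rw [hT w, hcount w]; by_cases hwx : w = x
        · subst hwx; rw [if_pos rfl]; omega
        · simp [hwx]
      · intro w; rw [PySem.Set.mem_add, hU w, hcount w]; by_cases hwx : w = x
        · subst hwx; rw [if_pos rfl]; simp only [or_true, true_iff]; omega
        · simp [hwx]
    · have h2' : l.count x < 2 := by
        by_contra hc; exact hxT ((hT x).mpr (by omega))
      by_cases hxS : x ∈ S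
      · have h1 : 1 ≤ l.count x := (hmemS x).mp hxS
        refine ⟨S, PySem.Set.add T x, U, by simp [pvStep, hxT, hxS], hSn,
          PySem.Set.nodup_add T x hTn, ?_, ?_, ?_⟩
        · intro w; rw [hS w]; constructor
          · intro h; exact List.mem_append_left _ h
          · intro h; rcases List.mem_append.mp h with h | h
            · exact h
            · simp at h; subst h; exact List.count_pos_iff.mp (by omega)
        · intro w; rw [PySem.Set.mem_add, hT w, hcount w]; by_cases hwx : w = x
          · subst hwx; rw [if_pos rfl]; simp only [or_true, true_iff]; omega
          · simp [hwx]
        · intro w; rw [hU w, hcount w]; by_cases hwx : w = x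
          · subst hwx; rw [if_pos rfl]; omega
          · simp [hwx]
      · have h0 : l.count x = 0 := by
          by_contra hc; exact hxS ((hmemS x).mpr (by omega))
        refine ⟨PySem.Set.add S x, T, U, by simp [pvStep, hxT, hxS], PySem.Set.nodup_add S x hSn,
          hTn, ?_, ?_, ?_⟩
        · intro w; rw [PySem.Set.mem_add, hS w]; simp
        · intro w; rw [hT w, hcount w]; by_cases hwx : w = x
          · subst hwx; rw [if_pos rfl]; omega
          · simp [hwx]
        · intro w; rw [hU w, hcount w]; by_cases hwx : w = x
          · subst hwx; rw [if_pos rfl]; omega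
          · simp [hwx]

lemma pv_len_eq {α : Type} [BEq α] (s : PySem.Set α) : PySem.Set.len s = (s.length : Int) := by
  simp [PySem.Set.len]

-- ===== VERDICT (by name: the statement is the Claim_ definition above) =====
theorem occurance_of_words_spec : Claim_equal_occurance_of_words := by
  intro text _
  unfold Spec_occurance_of_words occurance_of_words occurance_of_words_alt
  set ws := PySem.Chars.splitOn text.toList [' '] with hws
  have hA : ws.foldl pvStepA (([], [], [])) =
      (ws.filter (fun w => !pvPunctWords.contains w)).foldl pvStep (([], [], [])) := by
    rw [PySem.List.foldl_congr_mem ws pvStepA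
      (fun st w => if pvPunctWords.contains w then st else pvStep st w) _ ?_]
    · exact pv_foldl_skip _ _ ws _
    · intro st w hw
      have hsp : ' ' ∉ w := pv_mem_splitOn_space _ _ hw
      simp [pvStepA, pvStep, pv_replace_fold_id pvPunct w hsp]
  have hB : ws.foldl
      (fun d w => if pvPunctWords.contains w then d else d.insert w (d.getD w 0 + 1))
      (PySem.Dict.empty : PySem.Dict (List Char) Int)
      = PySem.Dict.counter (ws.filter (fun w => !pvPunctWords.contains w)) := by
    rw [pv_foldl_skip _ _ ws _, PySem.Dict.foldl_insert_getD_add_one_eq_counter]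
  set l := ws.filter (fun w => !pvPunctWords.contains w) with hl
  obtain ⟨S, T, U, heq, hSn, hTn, hS, hT, hU⟩ := pvInv l
  rw [hA, hB, heq]
  have hvals : (PySem.Dict.counter l).values
      = (PySem.Set.ofList l).map (fun k => (l.count k : Int)) := by
    simp [PySem.Dict.values, PySem.Dict.items_counter]
  have hsize : PySem.Dict.size (PySem.Dict.counter l) = (PySem.Set.ofList l).length := by
    simp [PySem.Dict.size, PySem.Dict.items_counter]
  have hSperm : S.Perm (PySem.Set.ofList l) := by
    rw [List.perm_ext_iff_of_nodup hSn (PySem.Set.nodup_ofList l)]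
    intro a; rw [hS a, PySem.Set.mem_ofList]
  have e1 : S.length = (PySem.Set.ofList l).length := hSperm.length_eq
  have e2 : (PySem.Set.diff S T).length
      = ((PySem.Set.ofList l).map (fun k => (l.count k : Int))).countP (fun c => c == 1) := by
    rw [List.countP_map]
    have hd : (PySem.Set.diff S T).length = S.countP (fun x => !PySem.Set.contains T x) := by
      simp [PySem.Set.diff, List.countP_eq_length_filter]
    rw [hd, hSperm.countP_eq]
    apply List.countP_congr
    intro x hx
    have h1 : 1 ≤ l.count x := List.count_pos_iff.mpr ((PySem.Set.mem_ofList l x).mp hx)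
    constructor
    · intro h
      have hxT : x ∉ T := by simpa [PySem.Set.contains] using h
      rw [hT x] at hxT
      have : l.count x = 1 := by omega
      simp [Function.comp, this]
    · intro h
      have hc1 : (l.count x : Int) = 1 := by simpa [Function.comp] using h
      have hc : l.count x = 1 := by exact_mod_cast hc1
      have hxT : x ∉ T := by rw [hT x]; omega
      simpa [PySem.Set.contains] using hxT
  have hTperm : T.Perm ((PySem.Set.ofList l).filter (fun k => decide (2 ≤ l.count k))) := by
    rw [List.perm_ext_iff_of_nodup hTn ((PySem.Set.nodup_ofList l).filter _)]
    intro a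
    rw [hT a]
    simp only [List.mem_filter, PySem.Set.mem_ofList, decide_eq_true_eq]
    constructor
    · intro h; exact ⟨List.count_pos_iff.mp (by omega), h⟩
    · intro h; exact h.2
  have e3 : (PySem.Set.diff T U).length
      = ((PySem.Set.ofList l).map (fun k => (l.count k : Int))).countP (fun c => c == 2) := by
    rw [List.countP_map]
    have hd : (PySem.Set.diff T U).length = T.countP (fun x => !PySem.Set.contains U x) := by
      simp [PySem.Set.diff, List.countP_eq_length_filter]
    rw [hd]
    have hTc : T.countP (fun x => !PySem.Set.contains U x)
        = T.countP (fun k => (l.count k : Int) == 2) := by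
      apply List.countP_congr
      intro x hx
      have h2 : 2 ≤ l.count x := (hT x).mp hx
      constructor
      · intro h
        have hxU : x ∉ U := by simpa [PySem.Set.contains] using h
        rw [hU x] at hxU
        have : l.count x = 2 := by omega
        simp [this]
      · intro h
        have hc2 : (l.count x : Int) = 2 := by simpa using h
        have hc : l.count x = 2 := by exact_mod_cast hc2
        have hxU : x ∉ U := by rw [hU x]; omega
        simpa [PySem.Set.contains] using hxU
    rw [hTc, hTperm.countP_eq, List.countP_filter]
    apply List.countP_congr
    intro x _
    constructor
    · intro h
      have hc2 : (l.count x : Int) = 2 := by simpa using (Bool.and_elim_left h)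
      simpa using hc2
    · intro h
      have hc2 : (l.count x : Int) = 2 := by simpa using h
      have hc : l.count x = 2 := by exact_mod_cast hc2
      simp [hc]
  simp only [pv_len_eq, e1, e2, e3, hvals, hsize]
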